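-- pv_equiv track=rewrite | github.com/xandwr/doctown-v8 | documenter/tools.py | _find_chunk_line
-- ===== SOURCE A (Python) =====
-- def _find_chunk_line(lines, chunk_text):
--     """
--     Find the line number where a chunk appears in the file.
--     Returns the first line of the chunk (0-indexed).
--     """
--     chunk_lines = chunk_text.strip().splitlines()
--     if not chunk_lines:
--         return None
--
--     # Search for the first line of the chunk
--     first_chunk_line = chunk_lines[0].strip()
--
--     for i, line in enumerate(lines):
--         if first_chunk_line in line.strip():
--             # Found a potential match, verify by checking subsequent lines
--             match = True
--             for j, chunk_line in enumerate(chunk_lines):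
--                 if i + j >= len(lines):
--                     match = False
--                     break
--                 if chunk_line.strip() not in lines[i + j].strip():
--                     match = False
--                     break
--
--             if match:
--                 return i
--
--     # Fallback: just find first line
--     for i, line in enumerate(lines):
--         if first_chunk_line in line.strip():
--             return i
--
--     return None
-- ===== SOURCE B (Python) =====
-- def _find_chunk_line(lines, chunk_text):
--     """Column-wise DP: fold chunk lines back-to-front into a boolean array of
--     verified start positions, then one pass returns the first verified candidate
--     or the first-candidate fallback."""
--     chunk_lines = chunk_text.strip().splitlines()
--     if not chunk_lines:
--         return None
--     stripped = [line.strip() for line in lines]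
--     n = len(lines)
--     good = [True] * (n + 1)
--     for cl in reversed(chunk_lines):
--         needle = cl.strip()
--         good = [i < n and needle in stripped[i] and good[i + 1] for i in range(n + 1)]
--     first = chunk_lines[0].strip()
--     fallback = None
--     for i, s in enumerate(stripped):
--         if first in s:
--             if good[i]:
--                 return i
--             if fallback is None:
--                 fallback = i
--     return fallback
-- ===== Notes on version B (the rewrite author's own statement) =====
-- stated objective: alternative
-- what changed: Replaced A's per-candidate row-wise verification (re-scanning the chunk at each candidate) and its duplicate fallback scan by a column-wise boolean DP: a verified-start array over all line positions is built by folding the chunk lines back-to-front over pre-stripped lines, then a single pass returns the first verified start or the first-candidate fallback.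
import Mathlib
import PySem

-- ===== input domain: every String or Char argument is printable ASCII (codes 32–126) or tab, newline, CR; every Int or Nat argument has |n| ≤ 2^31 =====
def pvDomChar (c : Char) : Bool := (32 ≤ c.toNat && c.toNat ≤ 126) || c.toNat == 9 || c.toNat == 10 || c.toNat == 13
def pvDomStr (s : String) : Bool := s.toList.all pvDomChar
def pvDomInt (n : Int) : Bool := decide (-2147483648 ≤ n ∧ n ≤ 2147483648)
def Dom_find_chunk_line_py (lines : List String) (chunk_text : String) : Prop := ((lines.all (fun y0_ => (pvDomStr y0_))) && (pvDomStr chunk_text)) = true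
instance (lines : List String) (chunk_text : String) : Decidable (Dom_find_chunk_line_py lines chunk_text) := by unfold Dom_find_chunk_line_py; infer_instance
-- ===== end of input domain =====

-- B replaces A's per-candidate row-wise verification and duplicate fallback scan by a
-- column-wise boolean DP over start positions (chunk lines folded back-to-front) plus one pass.

-- ===== PORT A =====
-- inner 'for j, chunk_line in enumerate(chunk_lines)' verify loop (break-on-failure)
def pvA_verify (lines : List String) : List String → Nat → Bool
  | [], _ => true
  | c :: cs, k =>
    if lines.length ≤ k then false
    else if PySem.Str.isIn (PySem.Str.strip c) (PySem.Str.strip (lines.getD k "")) then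
      pvA_verify lines cs (k + 1)
    else false

-- outer 'for i, line in enumerate(lines)' scan with embedded verification
def pvA_scan (lines chunkLines : List String) (first : String) : List String → Nat → Option Int
  | [], _ => none
  | l :: rest, i =>
    if PySem.Str.isIn first (PySem.Str.strip l) then
      if pvA_verify lines chunkLines i then some ((i : Nat) : Int)
      else pvA_scan lines chunkLines first rest (i + 1)
    else pvA_scan lines chunkLines first rest (i + 1)

-- the second, fallback 'for i, line in enumerate(lines)' scan
def pvA_fallback (first : String) : List String → Nat → Option Int
  | [], _ => none
  | l :: rest, i =>
    if PySem.Str.isIn first (PySem.Str.strip l) then some ((i : Nat) : Int)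
    else pvA_fallback first rest (i + 1)

def find_chunk_line_py (lines : List String) (chunk_text : String) : Option Int :=
  let chunkLines := PySem.Str.splitlines (PySem.Str.strip chunk_text)
  if chunkLines.isEmpty then none
  else
    let first := PySem.Str.strip (chunkLines.getD 0 "")
    match pvA_scan lines chunkLines first lines 0 with
    | some i => some i
    | none => pvA_fallback first lines 0

-- ===== PORT B =====
-- one DP step: 'good = [i < n and needle in stripped[i] and good[i+1] for i in range(n+1)]'
def pvB_step (n : Nat) (stripped : List String) (needle : String) (good : List Bool) : List Bool :=
  (List.range (n + 1)).map (fun i =>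
    decide (i < n) && PySem.Str.isIn needle (stripped.getD i "") && good.getD (i + 1) true)

-- final pass: 'for i, s in enumerate(stripped): …' with the fallback accumulator
-- (good[i] is always an in-range access here; getD's default is never used)
def pvB_scan (first : String) (good : List Bool) : List String → Nat → Option Int → Option Int
  | [], _, fb => fb
  | s :: rest, i, fb =>
    if PySem.Str.isIn first s then
      if good.getD i true then some ((i : Nat) : Int)
      else pvB_scan first good rest (i + 1) (if fb.isNone then some ((i : Nat) : Int) else fb)
    else pvB_scan first good rest (i + 1) fb

def find_chunk_line_py_alt (lines : List String) (chunk_text : String) : Option Int :=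
  let chunkLines := PySem.Str.splitlines (PySem.Str.strip chunk_text)
  if chunkLines.isEmpty then none
  else
    let stripped := lines.map PySem.Str.strip
    let n := lines.length
    -- 'for cl in reversed(chunk_lines): good = …'
    let good := chunkLines.reverse.foldl
      (fun g cl => pvB_step n stripped (PySem.Str.strip cl) g) (List.replicate (n + 1) true)
    let first := PySem.Str.strip (chunkLines.getD 0 "")
    pvB_scan first good stripped 0 none

-- ===== PRECONDITION & SPEC =====
def Spec_find_chunk_line_py (lines : List String) (chunk_text : String) (out : Option Int) : Prop := out = find_chunk_line_py_alt lines chunk_text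
instance (lines : List String) (chunk_text : String) (out : Option Int) : Decidable (Spec_find_chunk_line_py lines chunk_text out) := by unfold Spec_find_chunk_line_py; infer_instance

-- ===== CLAIM (what is proved, stated in full; the proofs are below) =====
def Claim_equal_find_chunk_line_py : Prop := ∀ (lines : List String) (chunk_text : String), Dom_find_chunk_line_py lines chunk_text → Spec_find_chunk_line_py lines chunk_text (find_chunk_line_py lines chunk_text)

-- ===== LEMMAS AND PROOFS =====

-- one DP step read at an in-range index
theorem pvB_step_getD (n : Nat) (s : List String) (nd : String) (g : List Bool) (k : Nat)
    (hk : k ≤ n) :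
    (pvB_step n s nd g).getD k true =
      (decide (k < n) && PySem.Str.isIn nd (s.getD k "") && g.getD (k + 1) true) := by
  unfold pvB_step
  rw [List.getD_eq_getElem?_getD, List.getElem?_map, List.getElem?_range (Nat.lt_succ_of_le hk)]
  simp

-- the DP array (chunk lines folded back-to-front) computes exactly A's verifier
theorem pv_good_eq (lines : List String) : ∀ (cs : List String) (k : Nat), k ≤ lines.length →
    (cs.foldr (fun cl g => pvB_step lines.length (lines.map PySem.Str.strip) (PySem.Str.strip cl) g)
      (List.replicate (lines.length + 1) true)).getD k true = pvA_verify lines cs k := by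
  intro cs
  induction cs with
  | nil =>
    intro k hk
    simp [pvA_verify, List.getD_eq_getElem?_getD, Nat.lt_succ_of_le hk]
  | cons c cs ih =>
    intro k hk
    simp only [List.foldr_cons]
    rw [pvB_step_getD _ _ _ _ k hk]
    by_cases hkn : lines.length ≤ k
    · have : ¬ k < lines.length := by omega
      simp [pvA_verify, hkn, this]
    · have hlt : k < lines.length := by omega
      have hstr : (lines.map PySem.Str.strip).getD k "" = PySem.Str.strip (lines.getD k "") := by
        rw [List.getD_eq_getElem?_getD, List.getD_eq_getElem?_getD, List.getElem?_map,
          List.getElem?_eq_getElem hlt]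
        simp
      rw [hstr, ih (k + 1) (by omega)]
      simp only [pvA_verify, if_neg hkn, hlt, decide_true, Bool.true_and]
      cases PySem.Str.isIn (PySem.Str.strip c) (PySem.Str.strip (lines.getD k "")) <;> simp

-- B's single pass with fallback accumulator equals A's scan followed by the fallback scan
theorem pv_scan_eq (lines chunkLines : List String) (first : String) (good : List Bool)
    (hg : ∀ k, k < lines.length → good.getD k true = pvA_verify lines chunkLines k) :
    ∀ (l' : List String) (i : Nat) (fb : Option Int), i + l'.length ≤ lines.length →
    pvB_scan first good (l'.map PySem.Str.strip) i fb =
      (match pvA_scan lines chunkLines first l' i with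
       | some r => some r
       | none => match fb with
         | some v => some v
         | none => pvA_fallback first l' i) := by
  intro l'
  induction l' with
  | nil =>
    intro i fb _
    cases fb <;> simp [pvB_scan, pvA_scan, pvA_fallback]
  | cons x rest ih =>
    intro i fb hlen
    have hi : i < lines.length := by simp at hlen; omega
    simp only [List.map_cons, pvB_scan, pvA_scan, pvA_fallback]
    by_cases hin : PySem.Str.isIn first (PySem.Str.strip x) = true
    · rw [hg i hi] at *
      simp only [hin, if_true]
      by_cases hv : pvA_verify lines chunkLines i = true
      · simp [hv]
      · simp only [hv, Bool.false_eq_true, if_false]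
        rw [ih (i + 1) (if fb.isNone then some ((i : Nat) : Int) else fb) (by simp at hlen ⊢; omega)]
        cases fb <;> cases h : pvA_scan lines chunkLines first rest (i + 1) <;> simp
    · simp only [hin, Bool.false_eq_true, if_false]
      exact ih (i + 1) fb (by simp at hlen ⊢; omega)

-- ===== VERDICT (by name: the statement is the Claim_ definition above) =====
theorem find_chunk_line_py_spec : Claim_equal_find_chunk_line_py := by
  intro lines chunk_text _
  unfold Spec_find_chunk_line_py find_chunk_line_py find_chunk_line_py_alt
  simp only []
  by_cases h : (PySem.Str.splitlines (PySem.Str.strip chunk_text)).isEmpty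
  · simp [h]
  · simp only [h, Bool.false_eq_true, if_false]
    rw [List.foldl_reverse]
    rw [pv_scan_eq lines _ _ _
      (fun k hk => pv_good_eq lines _ k (Nat.le_of_lt hk)) lines 0 none (by omega)]
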